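-- pv_equiv track=rewrite | github.com/irrso/algorithm | 백준/Silver/1436. 영화감독 숌/영화감독 숌.py | conti
-- ===== SOURCE A (Python) =====
-- def conti(nums):
-- 	count = 0
--
-- 	for num in nums:
-- 		if num == '6':
-- 			count += 1
-- 			if count >= 3:
-- 				return True
-- 		else:
-- 			count = 0
--
-- 	return False
-- ===== SOURCE B (Python) =====
-- def conti(nums):
-- 	return '666' in nums
-- ===== Notes on version B (the rewrite author's own statement) =====
-- stated objective: idiomatic
-- what changed: Replaced the stateful consecutive-counter loop (count reset on non-'6') by a single Python substring-membership test for three consecutive sixes.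
import Mathlib
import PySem

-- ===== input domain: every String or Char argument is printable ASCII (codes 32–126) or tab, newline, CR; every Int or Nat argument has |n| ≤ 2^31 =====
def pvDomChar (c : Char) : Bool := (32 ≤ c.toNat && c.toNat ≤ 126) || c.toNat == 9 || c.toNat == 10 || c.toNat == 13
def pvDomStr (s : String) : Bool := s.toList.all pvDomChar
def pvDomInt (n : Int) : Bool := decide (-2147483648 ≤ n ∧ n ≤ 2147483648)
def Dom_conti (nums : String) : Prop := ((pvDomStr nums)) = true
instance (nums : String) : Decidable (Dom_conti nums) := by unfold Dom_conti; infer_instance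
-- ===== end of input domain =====

-- B replaces A's stateful consecutive-counter loop by a single substring-membership test; idiomatic, measured faster in a timing run (constant factor).

-- ===== PORT A =====
-- the for-loop with early return and the running count, step for step
def contiLoop : List Char → Int → Bool
  | [], _ => false
  | num :: rest, count =>
      if num = '6' then
        if count + 1 ≥ 3 then true else contiLoop rest (count + 1)
      else contiLoop rest 0

def conti (nums : String) : Bool := contiLoop nums.toList 0

-- ===== PORT B =====
def conti_alt (nums : String) : Bool := PySem.Str.isIn "666" nums

-- ===== PRECONDITION & SPEC =====
def Spec_conti (nums : String) (out : Bool) : Prop := out = conti_alt nums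
instance (nums : String) (out : Bool) : Decidable (Spec_conti nums out) := by unfold Spec_conti; infer_instance

-- ===== CLAIM (what is proved, stated in full; the proofs are below) =====
def Claim_equal_conti : Prop := ∀ (nums : String), Dom_conti nums → Spec_conti nums (conti nums)

-- ===== LEMMAS AND PROOFS =====

-- proof-side structural "contains 666" predicate
def has666 : List Char → Bool
  | [] => false
  | a :: rest => (decide (a = '6') && decide (rest.take 2 = ['6', '6'])) || has666 rest

theorem has666_iff_infix (s : List Char) : has666 s = true ↔ ['6','6','6'] <:+: s := by
  induction s with
  | nil => simp [has666]
  | cons a rest ih =>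
      rw [List.infix_cons_iff]
      simp only [has666, Bool.or_eq_true, Bool.and_eq_true, decide_eq_true_eq]
      constructor
      · rintro (⟨rfl, htake⟩ | h)
        · left
          match rest, htake with
          | b :: c :: t, h =>
            simp only [List.take, List.cons.injEq] at h
            obtain ⟨rfl, rfl, -⟩ := h
            exact ⟨t, rfl⟩
        · exact Or.inr (ih.mp h)
      · rintro (⟨t, ht⟩ | h)
        · match rest, ht with
          | _, rfl => exact Or.inl ⟨rfl, rfl⟩
        · exact Or.inr (ih.mpr h)

theorem contiLoop_eq (s : List Char) : ∀ c : Int, 0 ≤ c →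
    contiLoop s c = has666 (List.replicate (min c.toNat 2) '6' ++ s) := by
  induction s with
  | nil =>
      intro c _
      have hk : min c.toNat 2 ≤ 2 := min_le_right _ _
      set k := min c.toNat 2 with hkdef
      clear_value k
      interval_cases k <;> simp [contiLoop, has666]
  | cons a rest ih =>
      intro c hc
      by_cases ha : a = '6'
      · subst ha
        simp only [contiLoop]
        by_cases h3 : c + 1 ≥ 3
        · have h2 : min c.toNat 2 = 2 := by omega
          simp [if_pos h3, h2, List.replicate, has666]
        · have hmin : min (c + 1).toNat 2 = min c.toNat 2 + 1 := by omega
          rw [if_neg h3, ih (c + 1) (by omega), hmin, List.replicate_succ',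
            List.append_assoc, List.singleton_append]
          simp
      · simp only [contiLoop, if_neg ha]
        rw [ih 0 le_rfl]
        simp only [Int.toNat_zero, Nat.zero_min, List.replicate_zero, List.nil_append]
        have hstep : ∀ k, k ≤ 2 →
            has666 (List.replicate k '6' ++ a :: rest) = has666 rest := by
          intro k hk
          interval_cases k <;>
            simp [has666, ha, List.take]
        exact (hstep _ (by omega)).symm

-- ===== VERDICT (by name: the statement is the Claim_ definition above) =====
theorem conti_spec : Claim_equal_conti := by
  intro nums _
  unfold Spec_conti conti conti_alt
  rw [contiLoop_eq nums.toList 0 le_rfl]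
  simp only [Int.toNat_zero, Nat.zero_min, List.replicate_zero, List.nil_append]
  rw [Bool.eq_iff_iff, has666_iff_infix, PySem.Str.isIn_iff_infix]
  rfl
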